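-- pv_equiv track=rewrite | github.com/luoruofeng/movie_opt | movie_opt/utils.py | colorize_text
-- ===== SOURCE A (Python) =====
-- def find_keywords_indices(line: str, key_words: dict) -> list[tuple[int, str, str]]:
--     """
--     在给定的行中找到包含关键词的位置及关键词本身及颜色。
--
--     :param line: 需要搜索的字符串
--     :param key_words: 关键词字典，键是关键词，值是颜色
--     :return: 包含 (起始下标, 关键词, 颜色) 的列表
--     """
--     results = []
--     for keyword, color in key_words.items():
--         start = 0
--         while (index := line.find(keyword, start)) != -1:
--             results.append((index, keyword, color))
--             start = index + len(keyword)  # 防止重复匹配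
--     return sorted(results, key=lambda x: x[0])  # 按索引排序，确保顺序绘制
--
-- def colorize_text(text, key_words):
--     """
--     将文本分割为带颜色标记的部分。
--
--     :param text: 需要处理的文本
--     :param key_words: 关键词字典，键是关键词，值是颜色
--     :return: [(文本片段, 颜色)]，颜色为空字符串时表示默认颜色
--     """
--     indices = find_keywords_indices(text, key_words)
--     result = []
--     last_index = 0
--
--     for index, keyword, color in indices:
--         if last_index < index:
--             result.append((text[last_index:index], ""))  # 默认颜色部分
--         result.append((keyword, color))  # 关键字部分
--         last_index = index + len(keyword)
--
--     if last_index < len(text):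
--         result.append((text[last_index:], ""))  # 剩余部分
--     return result
-- ===== SOURCE B (Python) =====
-- def colorize_text(text, key_words):
--     n = len(text)
--     # group the keywords by length, then find every keyword's greedy
--     # non-overlapping occurrences with one sliding-window pass per length
--     by_len = {}
--     for kw in key_words:
--         by_len.setdefault(len(kw), set()).add(kw)
--     hits = {kw: [] for kw in key_words}
--     for L, group in by_len.items():
--         for i in range(n - L + 1):
--             w = text[i:i + L]
--             if w in group:
--                 h = hits[w]
--                 if not h or h[-1] + L <= i:
--                     h.append(i)
--     # order matches by position; earlier-listed keywords win ties
--     order = {kw: r for r, kw in enumerate(key_words)}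
--     matches = sorted(((i, kw, color) for kw, color in key_words.items() for i in hits[kw]),
--                      key=lambda m: (m[0], order[m[1]]))
--     parts = []
--     last = 0
--     for i, kw, color in matches:
--         if last < i:
--             parts.append((text[last:i], ""))
--         parts.append((kw, color))
--         last = i + len(kw)
--     if last < n:
--         parts.append((text[last:], ""))
--     return parts
-- ===== Notes on version B (the rewrite author's own statement) =====
-- stated objective: faster
-- what changed: A scans the text once per keyword with str.find and relies on a stable sort by start index; B groups keywords by length, finds all keywords' greedy occurrences with one sliding-window pass per distinct length using hashed set lookups, and sorts matches by the explicit key (start, keyword rank); Pre_ excludes only inputs containing an empty keyword, on which A's find loop never terminates.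
import Mathlib
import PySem

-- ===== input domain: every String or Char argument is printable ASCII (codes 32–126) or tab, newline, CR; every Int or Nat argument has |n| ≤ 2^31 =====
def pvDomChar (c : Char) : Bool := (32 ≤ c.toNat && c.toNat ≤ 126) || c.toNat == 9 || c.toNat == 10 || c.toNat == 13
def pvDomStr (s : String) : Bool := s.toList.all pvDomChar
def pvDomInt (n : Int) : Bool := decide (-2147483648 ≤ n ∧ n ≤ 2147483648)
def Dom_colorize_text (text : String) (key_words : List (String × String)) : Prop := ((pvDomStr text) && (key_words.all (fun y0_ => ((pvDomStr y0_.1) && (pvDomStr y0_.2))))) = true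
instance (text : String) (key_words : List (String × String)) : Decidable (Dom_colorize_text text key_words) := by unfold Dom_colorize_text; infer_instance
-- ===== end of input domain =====

-- B groups the keywords by length and finds all greedy matches with one sliding-window pass per
-- distinct keyword length, then sorts the matches by the explicit key (start, keyword rank)
-- (objective: faster — one pass per distinct length instead of one find scan per keyword).

-- ===== PORT A =====
-- the 'while (index := line.find(keyword, start)) != -1' loop; fuel = len(line)+1 is enough
-- because start strictly increases each iteration when the keyword is nonempty (Pre_);
-- on an empty keyword the Python loop diverges (excluded by Pre_).
def pvFindAll_A (cs : List Char) (kw : String) (color : String) (start : Int) : Nat → List (Int × String × String)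
  | 0 => []
  | Nat.succ f =>
    let index := PySem.Chars.findFrom cs kw.toList start none
    if index = -1 then []
    else (index, kw, color) :: pvFindAll_A cs kw color (index + (kw.toList.length : Int)) f

def find_keywords_indices_A (cs : List Char) (key_words : List (String × String)) : List (Int × String × String) :=
  PySem.List.sorted
    (((PySem.Dict.ofList key_words).items).foldl
      (fun acc p => acc ++ pvFindAll_A cs p.1 p.2 0 (cs.length + 1)) [])
    (fun x => x.1)

-- the segment-building loop over the (index, keyword, color) list
def pvBuild_A (cs : List Char) (indices : List (Int × String × String)) : List (String × String) :=
  let st := indices.foldl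
    (fun (st : List (String × String) × Int) m =>
      ((if st.2 < m.1 then st.1 ++ [(String.ofList (PySem.Chars.slice cs (some st.2) (some m.1)), "")] else st.1)
         ++ [(m.2.1, m.2.2)],
       m.1 + (m.2.1.toList.length : Int)))
    ([], 0)
  if st.2 < (cs.length : Int) then st.1 ++ [(String.ofList (PySem.Chars.slice cs (some st.2) none), "")] else st.1

def colorize_text (text : String) (key_words : List (String × String)) : List (String × String) :=
  pvBuild_A text.toList (find_keywords_indices_A text.toList key_words)

-- ===== PORT B =====
-- 'not h or h[-1] + L <= i'
def pvAllowed_B (L i : Int) (h : List Int) : Bool :=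
  match h.getLast? with
  | none => true
  | some x => decide (x + L ≤ i)

-- 'for i in range(n - L + 1): w = text[i:i+L]; if w in group: … h.append(i)'
def pvHitsPass_B (cs : List Char) (L : Int) (group : PySem.Set String)
    (hits : PySem.Dict String (List Int)) : PySem.Dict String (List Int) :=
  (PySem.List.pyRange 0 ((cs.length : Int) - L + 1) 1).foldl
    (fun hits i =>
      let w := String.ofList (PySem.List.slice cs (some i) (some (i + L)))
      if PySem.Set.contains group w && pvAllowed_B L i (hits.getD w []) then
        hits.modify w [] (fun l => l ++ [i])
      else hits)
    hits

-- 'by_len.setdefault(len(kw), set()).add(kw)' mutates the stored set in place = Dict.modify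
def pvByLen_B (keys : List String) : PySem.Dict Int (PySem.Set String) :=
  keys.foldl
    (fun d kw => d.modify ((kw.toList.length : Int)) PySem.Set.empty (fun s => PySem.Set.add s kw))
    PySem.Dict.empty

-- 'hits = {kw: [] for kw in key_words}'
def pvHits0_B (keys : List String) : PySem.Dict String (List Int) :=
  keys.foldl (fun d kw => d.insert kw ([] : List Int)) PySem.Dict.empty

-- 'for L, group in by_len.items(): …'
def pvHits_B (cs : List Char) (keys : List String) : PySem.Dict String (List Int) :=
  (pvByLen_B keys).items.foldl (fun h p => pvHitsPass_B cs p.1 p.2 h) (pvHits0_B keys)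

-- 'order = {kw: r for r, kw in enumerate(key_words)}'
def pvOrder_B (keys : List String) : PySem.Dict String Int :=
  (PySem.List.enumerate keys).foldl (fun d p => d.insert p.2 p.1) PySem.Dict.empty

-- the segment-building loop of B (same shape as A's)
def pvBuild_B (cs : List Char) (ms : List (Int × String × String)) : List (String × String) :=
  let st := ms.foldl
    (fun (st : List (String × String) × Int) m =>
      ((if st.2 < m.1 then st.1 ++ [(String.ofList (PySem.Chars.slice cs (some st.2) (some m.1)), "")] else st.1)
         ++ [(m.2.1, m.2.2)],
       m.1 + (m.2.1.toList.length : Int)))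
    ([], 0)
  if st.2 < (cs.length : Int) then st.1 ++ [(String.ofList (PySem.Chars.slice cs (some st.2) none), "")] else st.1

-- sorted(..., key=lambda m: (m[0], order[m[1]])); m[1] is always a key of 'order', so getD is exact
def colorize_text_alt (text : String) (key_words : List (String × String)) : List (String × String) :=
  let cs := text.toList
  let kwd := PySem.Dict.ofList key_words
  let hits := pvHits_B cs kwd.keys
  let order := pvOrder_B kwd.keys
  let ms := PySem.List.sorted2
    (kwd.items.flatMap (fun p => (hits.getD p.1 []).map (fun i => (i, p.1, p.2))))
    (fun m => m.1) (fun m => order.getD m.2.1 0) false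
  pvBuild_B cs ms

-- ===== PRECONDITION & SPEC =====
-- Pre_ excludes only inputs containing an empty keyword, on which A's 'line.find(keyword, start)'
-- loop never terminates (Python diverges, returning nothing).
def Pre_colorize_text (text : String) (key_words : List (String × String)) : Prop :=
  ∀ p ∈ key_words, p.1 ≠ ""
instance (text : String) (key_words : List (String × String)) : Decidable (Pre_colorize_text text key_words) := by unfold Pre_colorize_text; infer_instance

def pvWitness_colorize_text : String × (List (String × String)) :=
  ("abc ab", [("ab", "red"), ("c", "blue")])

def Spec_colorize_text (text : String) (key_words : List (String × String)) (out : List (String × String)) : Prop := out = colorize_text_alt text key_words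
instance (text : String) (key_words : List (String × String)) (out : List (String × String)) : Decidable (Spec_colorize_text text key_words out) := by unfold Spec_colorize_text; infer_instance

-- ===== CLAIM (what is proved, stated in full; the proofs are below) =====
def Claim_equal_colorize_text : Prop := ∀ (text : String) (key_words : List (String × String)), Dom_colorize_text text key_words → Pre_colorize_text text key_words → Spec_colorize_text text key_words (colorize_text text key_words)

-- ===== LEMMAS AND PROOFS =====

-- the two segment-building loops are the same fold
theorem pvBuild_AB : pvBuild_A = pvBuild_B := rfl

-- proof-side reference function: the greedy non-overlapping match positions of kwl in cs
def pvScan (cs : List Char) (kwl : List Char) (i : Nat) : List Nat :=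
  if h : i < cs.length then
    if kwl.isPrefixOf (cs.drop i) then i :: pvScan cs kwl (i + max kwl.length 1)
    else pvScan cs kwl (i + 1)
  else []
termination_by cs.length - i
decreasing_by all_goals omega

-- one keyword's matches as (index, keyword, color) triples
def pvTrip (cs : List Char) (p : String × String) : List (Int × String × String) :=
  (pvScan cs p.1.toList 0).map (fun (j : Nat) => ((j : Int), p.1, p.2))

-- keys of the dict built from key_words are among the list's keys, so nonemptiness transfers
theorem pv_items_ne (key_words : List (String × String))
    (h : ∀ p ∈ key_words, p.1 ≠ "") :
    ∀ q ∈ (PySem.Dict.ofList key_words).items, q.1 ≠ "" := by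
  have gen : ∀ (l : List (String × String)) (d : PySem.Dict String String),
      (∀ p ∈ l, p.1 ≠ "") → (∀ q ∈ d.items, q.1 ≠ "") →
      ∀ q ∈ (List.foldl (fun acc p => acc.insert p.1 p.2) d l).items, q.1 ≠ "" := by
    intro l
    induction l with
    | nil => intro d _ hd q hq; exact hd q hq
    | cons p l ih =>
      intro d hl hd q hq
      refine ih (d.insert p.1 p.2) (fun r hr => hl r (List.mem_cons_of_mem _ hr)) ?_ q hq
      intro r hr
      rcases (PySem.Dict.mem_items_insert d p.1 p.2 r).1 hr with h1 | h2
      · subst h1; exact hl p List.mem_cons_self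
      · exact hd r h2.1
  intro q hq
  exact gen key_words PySem.Dict.empty h (by simp [PySem.Dict.empty]) q hq

-- every scan match starts at or after the scan position
theorem pvScan_lower (cs kwl : List Char) (i : Nat) :
    ∀ m ∈ pvScan cs kwl i, i ≤ m := by
  fun_induction pvScan cs kwl i with
  | case1 i h hpre ih =>
    intro m hm
    rcases List.mem_cons.1 hm with rfl | hm
    · exact le_rfl
    · have := ih m hm; omega
  | case2 i h hpre ih =>
    intro m hm; have := ih m hm; omega
  | case3 i h => intro m hm; simp at hm

-- every scan match leaves room for the keyword
theorem pvScan_ub (cs kwl : List Char) (i : Nat) :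
    ∀ m ∈ pvScan cs kwl i, m + kwl.length ≤ cs.length := by
  fun_induction pvScan cs kwl i with
  | case1 i h hpre ih =>
    intro m hm
    rcases List.mem_cons.1 hm with rfl | hm
    · have := (List.isPrefixOf_iff_prefix.1 hpre).length_le
      simp only [List.length_drop] at this
      omega
    · exact ih m hm
  | case2 i h hpre ih => intro m hm; exact ih m hm
  | case3 i h => intro m hm; simp at hm

theorem pvScan_nil_of_no_room (cs kwl : List Char) (j : Nat)
    (h : cs.length < j + kwl.length) : pvScan cs kwl j = [] := by
  cases hsc : pvScan cs kwl j with
  | nil => rfl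
  | cons a t =>
    have ha : a ∈ pvScan cs kwl j := hsc ▸ List.mem_cons_self
    have h1 := pvScan_lower cs kwl j a ha
    have h2 := pvScan_ub cs kwl j a ha
    omega

-- find returns exactly the scan position when the keyword matches there
theorem pv_find_at (cs : List Char) (kw : List Char) (i : Nat)
    (hi : i ≤ cs.length) (h : kw <+: cs.drop i) :
    PySem.Chars.findFrom cs kw (i : Int) none = (i : Int) := by
  have hne : PySem.Chars.findFrom cs kw (i : Int) none ≠ -1 := by
    intro hc
    exact (PySem.Chars.findFrom_natCast_eq_neg_one_iff cs kw i hi).1 hc h.isInfix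
  obtain ⟨h1, h2, h3⟩ := PySem.Chars.findFrom_natCast_spec cs kw i hi hne
  by_contra hcon
  have hlt : i < (PySem.Chars.findFrom cs kw (i : Int) none).toNat := by omega
  exact h3 i le_rfl hlt h

-- no match at the scan position: find from i equals find from i+1
theorem pv_find_skip (cs : List Char) (kw : List Char) (i : Nat)
    (hi : i < cs.length) (h : ¬ kw <+: cs.drop i) :
    PySem.Chars.findFrom cs kw (i : Int) none = PySem.Chars.findFrom cs kw ((i + 1 : Nat) : Int) none := by
  have hdrop : cs.drop i = cs[i] :: cs.drop (i + 1) := List.drop_eq_getElem_cons hi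
  have hiff : kw <:+: cs.drop i ↔ kw <:+: cs.drop (i + 1) := by
    rw [hdrop, List.infix_cons_iff]
    constructor
    · rintro (hp | hs)
      · exact absurd (hdrop ▸ hp) h
      · exact hs
    · exact Or.inr
  by_cases hinf : kw <:+: cs.drop (i + 1)
  · have hne1 : PySem.Chars.findFrom cs kw (i : Int) none ≠ -1 := by
      intro hc
      exact (PySem.Chars.findFrom_natCast_eq_neg_one_iff cs kw i (by omega)).1 hc (hiff.2 hinf)
    have hne2 : PySem.Chars.findFrom cs kw ((i + 1 : Nat) : Int) none ≠ -1 := by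
      intro hc
      exact (PySem.Chars.findFrom_natCast_eq_neg_one_iff cs kw (i + 1) (by omega)).1 hc hinf
    obtain ⟨a1, a2, a3⟩ := PySem.Chars.findFrom_natCast_spec cs kw i (by omega) hne1
    obtain ⟨b1, b2, b3⟩ := PySem.Chars.findFrom_natCast_spec cs kw (i + 1) (by omega) hne2
    set r1 := PySem.Chars.findFrom cs kw (i : Int) none with hr1
    set r2 := PySem.Chars.findFrom cs kw ((i + 1 : Nat) : Int) none with hr2
    have hr1i : r1.toNat ≠ i := fun he => h (he ▸ a2)
    have hr1ge : i + 1 ≤ r1.toNat := by omega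
    have e1 : ¬ r1.toNat < r2.toNat := fun hlt => b3 r1.toNat hr1ge hlt a2
    have e2 : ¬ r2.toNat < r1.toNat := fun hlt => a3 r2.toNat (by omega) hlt b2
    omega
  · have hne1 : PySem.Chars.findFrom cs kw (i : Int) none = -1 := by
      rw [PySem.Chars.findFrom_natCast_eq_neg_one_iff cs kw i (by omega)]
      exact fun hc => hinf (hiff.1 hc)
    have hne2 : PySem.Chars.findFrom cs kw ((i + 1 : Nat) : Int) none = -1 := by
      rw [PySem.Chars.findFrom_natCast_eq_neg_one_iff cs kw (i + 1) (by omega)]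
      exact hinf
    rw [hne1, hne2]

-- one unfolding step of A's find-loop
theorem pvFindAll_A_succ (cs : List Char) (kw color : String) (start : Int) (f : Nat) :
    pvFindAll_A cs kw color start (f + 1)
      = (if PySem.Chars.findFrom cs kw.toList start none = -1 then []
         else (PySem.Chars.findFrom cs kw.toList start none, kw, color)
           :: pvFindAll_A cs kw color (PySem.Chars.findFrom cs kw.toList start none + (kw.toList.length : Int)) f) := rfl

-- A's find-loop produces exactly the greedy scan positions (nonempty keyword)
theorem pv_findall_eq_scan (cs : List Char) (kw color : String) (hkw : kw.toList ≠ []) :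
    ∀ (d i : Nat), i ≤ cs.length → cs.length - i ≤ d → ∀ fuel, cs.length - i < fuel →
    pvFindAll_A cs kw color (i : Int) fuel
      = (pvScan cs kw.toList i).map (fun (j : Nat) => ((j : Int), kw, color)) := by
  have hkl : 1 ≤ kw.toList.length := by
    cases h : kw.toList with
    | nil => exact absurd h hkw
    | cons a t => simp
  intro d
  induction d with
  | zero =>
    intro i hi hd fuel hf
    have hieq : i = cs.length := by omega
    cases fuel with
    | zero => omega
    | succ f =>
      rw [pvFindAll_A_succ, pvScan, dif_neg (by omega)]
      have hfind : PySem.Chars.findFrom cs kw.toList (i : Int) none = -1 := by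
        rw [PySem.Chars.findFrom_natCast_eq_neg_one_iff cs kw.toList i hi]
        subst hieq
        simp only [List.drop_length]
        intro hc
        exact hkw (List.eq_nil_of_infix_nil hc)
      rw [if_pos hfind]
      rfl
  | succ d ih =>
    intro i hi hd fuel hf
    cases fuel with
    | zero => omega
    | succ f =>
      by_cases hlt : i < cs.length
      · by_cases hpre : kw.toList <+: cs.drop i
        · have hfind := pv_find_at cs kw.toList i hi hpre
          have hlen : kw.toList.length ≤ cs.length - i := by
            have := hpre.length_le
            simp only [List.length_drop] at this
            omega
          rw [pvFindAll_A_succ, hfind, if_neg (by omega), pvScan, dif_pos hlt,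
              if_pos (List.isPrefixOf_iff_prefix.2 hpre)]
          have hmax : max kw.toList.length 1 = kw.toList.length := by omega
          rw [hmax, List.map_cons]
          have hcast : (i : Int) + (kw.toList.length : Int) = ((i + kw.toList.length : Nat) : Int) := by
            push_cast; ring
          rw [hcast, ih (i + kw.toList.length) (by omega) (by omega) f (by omega)]
        · have hfind := pv_find_skip cs kw.toList i hlt hpre
          rw [pvFindAll_A_succ, hfind, ← pvFindAll_A_succ, pvScan, dif_pos hlt,
              if_neg (fun hc => hpre (List.isPrefixOf_iff_prefix.1 hc))]
          exact ih (i + 1) (by omega) (by omega) (f + 1) (by omega)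
      · have hieq : i = cs.length := by omega
        rw [pvFindAll_A_succ, pvScan, dif_neg hlt]
        have hfind : PySem.Chars.findFrom cs kw.toList (i : Int) none = -1 := by
          rw [PySem.Chars.findFrom_natCast_eq_neg_one_iff cs kw.toList i hi]
          subst hieq
          simp only [List.drop_length]
          intro hc
          exact hkw (List.eq_nil_of_infix_nil hc)
        rw [if_pos hfind]
        rfl

-- pointwise-equal functions give equal flatMaps
theorem pv_flatMap_cong {α β : Type} (f g : α → List β) :
    ∀ l : List α, (∀ x ∈ l, f x = g x) → l.flatMap f = l.flatMap g := by
  intro l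
  induction l with
  | nil => intro _; rfl
  | cons x l ih =>
    intro h
    rw [List.flatMap_cons, List.flatMap_cons, h x List.mem_cons_self,
        ih (fun y hy => h y (List.mem_cons_of_mem _ hy))]

-- A's side: the list A sorts is the concatenation of the greedy scan lists, keyword-major
theorem pv_matches_A (cs : List Char) (key_words : List (String × String))
    (hpre : ∀ p ∈ key_words, p.1 ≠ "") :
    find_keywords_indices_A cs key_words
      = PySem.List.sorted (((PySem.Dict.ofList key_words).items).flatMap (pvTrip cs)) (fun x => x.1) := by
  have hitems := pv_items_ne key_words hpre
  unfold find_keywords_indices_A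
  rw [PySem.List.foldl_append_eq_flatMap]
  simp only [List.nil_append]
  congr 1
  refine pv_flatMap_cong _ _ _ ?_
  intro p hp
  have hkw : p.1.toList ≠ [] := by
    intro hc
    exact hitems p hp (by rwa [← String.toList_eq_nil_iff])
  have := pv_findall_eq_scan cs p.1 p.2 hkw cs.length 0 (by omega) (by omega)
    (cs.length + 1) (by omega)
  simpa [pvTrip] using this

-- ===== B's hits dict =====

-- the by_len dict maps each length to the set of keywords of that length
theorem pv_bylen_getD (keys : List String) (L : Int) :
    (pvByLen_B keys).getD L PySem.Set.empty
      = PySem.Set.ofList (keys.filter (fun k => (k.toList.length : Int) = L)) := by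
  have gen : ∀ (l : List String),
      ((l.foldl
        (fun d kw => d.modify ((kw.toList.length : Int)) PySem.Set.empty (fun s => PySem.Set.add s kw))
        PySem.Dict.empty).getD L PySem.Set.empty)
      = PySem.Set.ofList (l.filter (fun k => (k.toList.length : Int) = L)) := by
    intro l
    induction l using List.reverseRecOn with
    | nil => simp [PySem.Set.ofList, PySem.Set.empty, PySem.Dict.getD_empty]
    | append_singleton l x ih =>
      rw [List.foldl_append, List.foldl_cons, List.foldl_nil, List.filter_append,
          PySem.Dict.getD_modify]
      by_cases hx : (x.toList.length : Int) = L
      · rw [if_pos hx.symm, hx, ih]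
        have hfx : List.filter (fun k => decide ((k.toList.length : Int) = L)) [x] = [x] := by
          rw [List.filter_cons, List.filter_nil, if_pos (by simp only [decide_eq_true_eq]; exact hx)]
        rw [hfx, PySem.Set.ofList_eq_foldl, PySem.Set.ofList_eq_foldl, List.foldl_append]
        rfl
      · rw [if_neg (fun he => hx he.symm), ih]
        have hfx : List.filter (fun k => decide ((k.toList.length : Int) = L)) [x] = [] := by
          rw [List.filter_cons, List.filter_nil, if_neg (by simp only [decide_eq_true_eq]; exact hx)]
        rw [hfx, List.append_nil]
  exact gen keys

-- ===== the per-length window pass =====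

-- a pass for a length different from kw's never touches hits[kw]
theorem pv_pass_preserve (cs : List Char) (keys : List String) (L : Int)
    (kw : String) (hne : (kw.toList.length : Int) ≠ L) :
    ∀ (is : List Int) (hits : PySem.Dict String (List Int)),
    (is.foldl
      (fun hits i =>
        let w := String.ofList (PySem.List.slice cs (some i) (some (i + L)))
        if PySem.Set.contains (PySem.Set.ofList (keys.filter (fun kw => (kw.toList.length : Int) = L))) w
            && pvAllowed_B L i (hits.getD w []) then
          hits.modify w [] (fun l => l ++ [i])
        else hits)
      hits).getD kw []
      = hits.getD kw [] := by
  intro is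
  induction is with
  | nil => intro hits; rfl
  | cons i is ih =>
    intro hits
    rw [List.foldl_cons, ih]
    set w := String.ofList (PySem.List.slice cs (some i) (some (i + L))) with hw
    by_cases hc : (PySem.Set.contains (PySem.Set.ofList (keys.filter (fun kw => (kw.toList.length : Int) = L))) w
        && pvAllowed_B L i (hits.getD w [])) = true
    · rw [if_pos hc]
      have hwg : w ∈ keys.filter (fun kw => (kw.toList.length : Int) = L) := by
        rw [Bool.and_eq_true] at hc
        exact (PySem.Set.mem_ofList _ _).1 ((PySem.Set.contains_iff _ _).1 hc.1)
      have hwl : (w.toList.length : Int) = L := by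
        have := List.of_mem_filter hwg
        simpa using this
      have hwk : kw ≠ w := fun he => hne (he ▸ hwl)
      exact PySem.Dict.getD_modify_of_ne hits [] _ hwk
    · rw [if_neg hc]

-- 'next allowed position' encoded by the last stored index
def pvNextOk (L : Nat) (prev : List Nat) : Nat :=
  match prev.getLast? with
  | none => 0
  | some x => x + L

-- the main pass lemma: from position a on, the pass appends exactly the greedy scan
-- positions of kw that start at or after max a (next-allowed)
theorem pv_pass_main (cs : List Char) (keys : List String) (kw : String)
    (hk : kw ∈ keys) (hkl : 1 ≤ kw.toList.length) (hln : kw.toList.length ≤ cs.length) :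
    ∀ (d a : Nat) (hits : PySem.Dict String (List Int)) (prev : List Nat),
    (cs.length - kw.toList.length + 1) - a ≤ d →
    hits.getD kw [] = prev.map (fun (j : Nat) => (j : Int)) →
    ((PySem.List.pyRange (a : Int) ((cs.length : Int) - (kw.toList.length : Int) + 1) 1).foldl
      (fun hits i =>
        let w := String.ofList (PySem.List.slice cs (some i) (some (i + (kw.toList.length : Int))))
        if PySem.Set.contains (PySem.Set.ofList (keys.filter (fun kw' => (kw'.toList.length : Int) = (kw.toList.length : Int)))) w
            && pvAllowed_B (kw.toList.length : Int) i (hits.getD w []) then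
          hits.modify w [] (fun l => l ++ [i])
        else hits)
      hits).getD kw []
      = (prev ++ pvScan cs kw.toList (max a (pvNextOk kw.toList.length prev))).map (fun (j : Nat) => (j : Int)) := by
  intro d
  induction d with
  | zero =>
    intro a hits prev hd hocc
    rw [PySem.List.pyRange_one_eq_nil (by omega), List.foldl_nil, hocc,
        pvScan_nil_of_no_room cs kw.toList _ (by
          have hma := le_max_left a (pvNextOk kw.toList.length prev)
          omega),
        List.append_nil]
  | succ d ih =>
    intro a hits prev hd hocc
    by_cases hrange : a < cs.length - kw.toList.length + 1
    · have haL : a + kw.toList.length ≤ cs.length := by omega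
      have han : a < cs.length := by omega
      rw [PySem.List.pyRange_one_cons (by omega)]
      simp only [List.foldl_cons]
      have hslice : PySem.List.slice cs (some (a : Int)) (some ((a : Int) + (kw.toList.length : Int)))
          = (cs.drop a).take kw.toList.length := PySem.List.slice_natCast_add cs a kw.toList.length
      have hcast1 : ((a : Int) + 1) = (((a + 1 : Nat)) : Int) := by push_cast; ring
      have hmaxL : max kw.toList.length 1 = kw.toList.length := by omega
      by_cases hpre : kw.toList <+: cs.drop a
      · have htake : (cs.drop a).take kw.toList.length = kw.toList :=
          (List.prefix_iff_eq_take.1 hpre).symm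
        have hw : String.ofList (PySem.List.slice cs (some (a : Int)) (some ((a : Int) + (kw.toList.length : Int)))) = kw := by
          rw [hslice, htake, String.ofList_toList]
        simp only [hw]
        have hg : PySem.Set.contains
            (PySem.Set.ofList (keys.filter (fun kw' => (kw'.toList.length : Int) = (kw.toList.length : Int)))) kw = true := by
          rw [PySem.Set.contains_iff, PySem.Set.mem_ofList]
          exact List.mem_filter.2 ⟨hk, by simp⟩
        rw [hocc]
        have hscan_a : pvScan cs kw.toList a = a :: pvScan cs kw.toList (a + kw.toList.length) := by
          rw [pvScan, dif_pos han, if_pos (List.isPrefixOf_iff_prefix.2 hpre), hmaxL]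
        cases hlast : prev.getLast? with
        | none =>
          have hall : pvAllowed_B (kw.toList.length : Int) (a : Int) (prev.map (fun (j : Nat) => (j : Int))) = true := by
            rw [pvAllowed_B, List.getLast?_map, hlast]
            rfl
          rw [if_pos (by rw [hg, hall]; rfl)]
          have hocc' : (hits.modify kw [] (fun l => l ++ [(a : Int)])).getD kw []
              = (prev ++ [a]).map (fun (j : Nat) => (j : Int)) := by
            rw [PySem.Dict.getD_modify_self, hocc]
            simp
          rw [hcast1, ih (a + 1) _ (prev ++ [a]) (by omega) hocc']
          have hnext : pvNextOk kw.toList.length (prev ++ [a]) = a + kw.toList.length := by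
            unfold pvNextOk; rw [List.getLast?_concat]
          rw [hnext]
          have hpn : pvNextOk kw.toList.length prev = 0 := by
            unfold pvNextOk; rw [hlast]
          have hm0 : max a (pvNextOk kw.toList.length prev) = a := by omega
          have hmm : max (a + 1) (a + kw.toList.length) = a + kw.toList.length := by omega
          rw [hm0, hscan_a, hmm]
          simp
        | some x =>
          by_cases hallow : x + kw.toList.length ≤ a
          · have hall : pvAllowed_B (kw.toList.length : Int) (a : Int) (prev.map (fun (j : Nat) => (j : Int))) = true := by
              rw [pvAllowed_B, List.getLast?_map, hlast, Option.map_some]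
              rw [show (match some ((x : Int)) with
                  | none => true
                  | some x => decide (x + (kw.toList.length : Int) ≤ (a : Int)))
                  = decide ((x : Int) + (kw.toList.length : Int) ≤ (a : Int)) from rfl]
              rw [decide_eq_true_eq]
              exact_mod_cast hallow
            rw [if_pos (by rw [hg, hall]; rfl)]
            have hocc' : (hits.modify kw [] (fun l => l ++ [(a : Int)])).getD kw []
                = (prev ++ [a]).map (fun (j : Nat) => (j : Int)) := by
              rw [PySem.Dict.getD_modify_self, hocc]
              simp
            rw [hcast1, ih (a + 1) _ (prev ++ [a]) (by omega) hocc']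
            have hnext : pvNextOk kw.toList.length (prev ++ [a]) = a + kw.toList.length := by
              unfold pvNextOk; rw [List.getLast?_concat]
            rw [hnext]
            have hpn : pvNextOk kw.toList.length prev = x + kw.toList.length := by
              unfold pvNextOk; rw [hlast]
            have hm0 : max a (pvNextOk kw.toList.length prev) = a := by omega
            have hmm : max (a + 1) (a + kw.toList.length) = a + kw.toList.length := by omega
            rw [hm0, hscan_a, hmm]
            simp
          · have hall : pvAllowed_B (kw.toList.length : Int) (a : Int) (prev.map (fun (j : Nat) => (j : Int))) = false := by
              rw [pvAllowed_B, List.getLast?_map, hlast, Option.map_some]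
              rw [show (match some ((x : Int)) with
                  | none => true
                  | some x => decide (x + (kw.toList.length : Int) ≤ (a : Int)))
                  = decide ((x : Int) + (kw.toList.length : Int) ≤ (a : Int)) from rfl]
              rw [decide_eq_false_iff_not]
              intro hc
              exact hallow (by exact_mod_cast hc)
            rw [if_neg (by rw [hall, Bool.and_false]; simp)]
            rw [hcast1, ih (a + 1) _ prev (by omega) hocc]
            have hmx : max a (pvNextOk kw.toList.length prev) = max (a + 1) (pvNextOk kw.toList.length prev) := by
              have hpn : pvNextOk kw.toList.length prev = x + kw.toList.length := by
                unfold pvNextOk; rw [hlast]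
              omega
            rw [hmx]
      · have hwne : String.ofList (PySem.List.slice cs (some (a : Int)) (some ((a : Int) + (kw.toList.length : Int)))) ≠ kw := by
          rw [hslice]
          intro he
          apply hpre
          rw [List.prefix_iff_eq_take]
          conv_lhs => rw [← he]
          rw [String.toList_ofList]
        have hstep : ∀ hits' : PySem.Dict String (List Int),
            hits'.getD kw [] = prev.map (fun (j : Nat) => (j : Int)) →
            ((if PySem.Set.contains
                (PySem.Set.ofList (keys.filter (fun kw' => (kw'.toList.length : Int) = (kw.toList.length : Int))))
                (String.ofList (PySem.List.slice cs (some (a : Int)) (some ((a : Int) + (kw.toList.length : Int)))))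
                && pvAllowed_B (kw.toList.length : Int) (a : Int)
                  (hits'.getD (String.ofList (PySem.List.slice cs (some (a : Int)) (some ((a : Int) + (kw.toList.length : Int))))) [])
              then hits'.modify (String.ofList (PySem.List.slice cs (some (a : Int)) (some ((a : Int) + (kw.toList.length : Int))))) [] (fun l => l ++ [(a : Int)])
              else hits') : PySem.Dict String (List Int)).getD kw []
              = prev.map (fun (j : Nat) => (j : Int)) := by
          intro hits' hocc'
          split
          · rw [PySem.Dict.getD_modify_of_ne _ [] _ (fun he => hwne he.symm)]
            exact hocc'
          · exact hocc'
        rw [hcast1, ih (a + 1) _ prev (by omega) (hstep hits hocc)]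
        rcases Nat.lt_or_ge a (pvNextOk kw.toList.length prev) with hm | hm
        · rw [show max a (pvNextOk kw.toList.length prev) = max (a + 1) (pvNextOk kw.toList.length prev) from by omega]
        · rw [show max (a + 1) (pvNextOk kw.toList.length prev) = a + 1 from by omega,
              show max a (pvNextOk kw.toList.length prev) = a from by omega]
          have hscan_a : pvScan cs kw.toList a = pvScan cs kw.toList (a + 1) := by
            rw [pvScan, dif_pos han, if_neg (fun hc => hpre (List.isPrefixOf_iff_prefix.1 hc))]
          rw [hscan_a]
    · rw [PySem.List.pyRange_one_eq_nil (by omega), List.foldl_nil, hocc,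
          pvScan_nil_of_no_room cs kw.toList _ (by
            have hma := le_max_left a (pvNextOk kw.toList.length prev)
            omega),
          List.append_nil]

-- initially every hits entry reads []
theorem pv_hits0_getD (keys : List String) (kw : String) :
    ((pvHits0_B keys).getD kw []) = [] := by
  have gen : ∀ (l : List String) (d : PySem.Dict String (List Int)),
      (∀ k, d.getD k [] = []) → ∀ k, ((l.foldl (fun d kw => d.insert kw []) d).getD k []) = [] := by
    intro l
    induction l with
    | nil => intro d hd k; exact hd k
    | cons x l ih =>
      intro d hd k
      refine ih (d.insert x []) ?_ k
      intro k'
      by_cases hx : k' = x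
      · subst hx; exact PySem.Dict.getD_insert_self d k' [] []
      · rw [PySem.Dict.getD_insert_of_ne d [] [] hx]; exact hd k'
  exact gen keys PySem.Dict.empty (fun k => PySem.Dict.getD_empty k []) kw

-- the hits dict of B: hits[kw] is exactly the greedy scan list of kw
theorem pv_hits_getD (cs : List Char) (keys : List String)
    (kw : String) (hk : kw ∈ keys) (hkw : kw.toList ≠ []) :
    (pvHits_B cs keys).getD kw []
      = (pvScan cs kw.toList 0).map (fun (j : Nat) => (j : Int)) := by
  have hkl : 1 ≤ kw.toList.length := by
    cases h : kw.toList with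
    | nil => exact absurd h hkw
    | cons a t => simp
  set lens := PySem.Set.ofList (keys.map (fun k => (k.toList.length : Int))) with hlens
  have hkeysBL : (pvByLen_B keys).keys = lens := by
    unfold pvByLen_B
    rw [PySem.Dict.keys_foldl_modify_key]
    rfl
  have hndBL : (pvByLen_B keys).keys.Nodup := by
    rw [hkeysBL]
    exact PySem.Set.nodup_ofList _
  have hitemsBL : (pvByLen_B keys).items
      = lens.map (fun L => (L, (pvByLen_B keys).getD L PySem.Set.empty)) := by
    rw [← hkeysBL]
    exact PySem.Dict.items_eq_map_keys _ hndBL PySem.Set.empty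
  set g := fun (hits : PySem.Dict String (List Int)) (L : Int) =>
    pvHitsPass_B cs L (PySem.Set.ofList (keys.filter (fun k => (k.toList.length : Int) = L))) hits
    with hgdef
  have hdef : pvHits_B cs keys = lens.foldl g (pvHits0_B keys) := by
    unfold pvHits_B
    rw [hitemsBL, List.foldl_map]
    simp only [pv_bylen_getD]
    rfl
  have hpres : ∀ (ls : List Int) (hits : PySem.Dict String (List Int)),
      (kw.toList.length : Int) ∉ ls → (ls.foldl g hits).getD kw [] = hits.getD kw [] := by
    intro ls
    induction ls with
    | nil => intro hits _; rfl
    | cons L ls ih =>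
      intro hits hnot
      rw [List.foldl_cons, ih _ (fun hm => hnot (List.mem_cons_of_mem _ hm))]
      have hne : (kw.toList.length : Int) ≠ L := fun he => hnot (he ▸ List.mem_cons_self)
      exact pv_pass_preserve cs keys L kw hne _ hits
  have hlmem : (kw.toList.length : Int) ∈ lens := by
    rw [hlens, PySem.Set.mem_ofList]
    exact List.mem_map.2 ⟨kw, hk, rfl⟩
  have hnd : lens.Nodup := PySem.Set.nodup_ofList _
  obtain ⟨l1, l2, hsplit⟩ := List.mem_iff_append.1 hlmem
  rw [hdef, hsplit]
  rw [hsplit, List.nodup_middle, List.nodup_cons] at hnd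
  have hn1 : (kw.toList.length : Int) ∉ l1 := fun hm => hnd.1 (List.mem_append_left _ hm)
  have hn2 : (kw.toList.length : Int) ∉ l2 := fun hm => hnd.1 (List.mem_append_right _ hm)
  rw [List.foldl_append, List.foldl_cons, hpres l2 _ hn2]
  have hinner : (List.foldl g (pvHits0_B keys) l1).getD kw [] = [] := by
    rw [hpres l1 _ hn1]
    exact pv_hits0_getD keys kw
  by_cases hbig : (cs.length : Int) < (kw.toList.length : Int)
  · show (pvHitsPass_B cs (kw.toList.length : Int) _ _).getD kw [] = _
    unfold pvHitsPass_B
    rw [PySem.List.pyRange_one_eq_nil (by omega), List.foldl_nil, hinner,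
        pvScan_nil_of_no_room cs kw.toList 0 (by omega)]
    rfl
  · have hmain := pv_pass_main cs keys kw hk hkl (by omega)
      (cs.length - kw.toList.length + 1) 0 (List.foldl g (pvHits0_B keys) l1) []
      (by omega) (by rw [hinner]; rfl)
    simp only [Nat.cast_zero] at hmain
    exact hmain

-- ===== the sort by (index, rank) =====

-- sorted2 written as its insertion fold
theorem pv_sorted2_eq_foldl {α : Type} (xs : List α) (k1 : α → Int) (k2 : α → Int) :
    PySem.List.sorted2 xs k1 k2 false
      = xs.foldl (fun acc x => PySem.List.insertBy
          (fun a b => decide (k1 a < k1 b) || (!decide (k1 b < k1 a) && decide (k2 a < k2 b))) x acc) [] := rfl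

-- insertBy only reads the predicate at elements of the list
theorem pv_insertBy_congr {α : Type} (p q : α → α → Bool) (x : α) :
    ∀ ys : List α, (∀ y ∈ ys, p x y = q x y) → PySem.List.insertBy p x ys = PySem.List.insertBy q x ys := by
  intro ys
  induction ys with
  | nil => intro _; rfl
  | cons y ys ih =>
    intro h
    simp only [PySem.List.insertBy]
    rw [h y List.mem_cons_self, ih (fun z hz => h z (List.mem_cons_of_mem _ hz))]

-- inserting a list whose secondary keys never decrease ignores the secondary key
theorem pv_foldl_insertBy_lex (rk : (Int × String × String) → Int) :
    ∀ (ms acc : List (Int × String × String)),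
    ms.Pairwise (fun a b => rk a ≤ rk b) → (∀ y ∈ acc, ∀ x ∈ ms, rk y ≤ rk x) →
    ms.foldl (fun acc x => PySem.List.insertBy
        (fun a b => decide (a.1 < b.1) || (!decide (b.1 < a.1) && decide (rk a < rk b))) x acc) acc
      = ms.foldl (fun acc x => PySem.List.insertBy (fun a b => decide (a.1 < b.1)) x acc) acc := by
  intro ms
  induction ms with
  | nil => intro acc _ _; rfl
  | cons x ms ih =>
    intro acc hpw hacc
    rw [List.foldl_cons, List.foldl_cons,
        pv_insertBy_congr _ _ x acc (by
          intro y hy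
          have hle : rk y ≤ rk x := hacc y hy x List.mem_cons_self
          have : decide (rk x < rk y) = false := by
            rw [decide_eq_false_iff_not]; omega
          rw [this, Bool.and_false, Bool.or_false])]
    refine ih (PySem.List.insertBy (fun a b => decide (a.1 < b.1)) x acc) (List.pairwise_cons.1 hpw).2 ?_
    intro y hy x' hx'
    rcases (PySem.List.mem_insertBy _ _ _ _).1 hy with rfl | hy'
    · exact (List.pairwise_cons.1 hpw).1 x' hx'
    · exact hacc y hy' x' (List.mem_cons_of_mem _ hx')

-- a fold of inserts over pairwise-distinct keys: lookup returns the paired value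
theorem pv_fold_pairs_fresh (l : List (Int × String)) (d : PySem.Dict String Int) (k : String)
    (hk : ∀ p ∈ l, p.2 ≠ k) :
    (l.foldl (fun d p => d.insert p.2 p.1) d).getD k 0 = d.getD k 0 := by
  induction l generalizing d with
  | nil => rfl
  | cons p l ih =>
    rw [List.foldl_cons, ih _ (fun q hq => hk q (List.mem_cons_of_mem _ hq)),
        PySem.Dict.getD_insert_of_ne _ _ _ (fun he => hk p List.mem_cons_self he.symm)]

theorem pv_fold_pairs_mem (l : List (Int × String)) (hnd : (l.map (·.2)).Nodup)
    (v : Int) (k : String) (hm : (v, k) ∈ l) (d : PySem.Dict String Int) :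
    (l.foldl (fun d p => d.insert p.2 p.1) d).getD k 0 = v := by
  induction l generalizing d with
  | nil => simp at hm
  | cons p l ih =>
    rw [List.map_cons, List.nodup_cons] at hnd
    rcases List.mem_cons.1 hm with rfl | hm'
    · rw [List.foldl_cons,
          pv_fold_pairs_fresh l _ k (by
            intro q hq he
            exact hnd.1 (he ▸ List.mem_map.2 ⟨q, hq, rfl⟩)),
          PySem.Dict.getD_insert_self]
    · rw [List.foldl_cons]; exact ih hnd.2 hm' _

-- the order dict assigns each key its position
theorem pv_order_getD (keys : List String) (hnd : keys.Nodup) (j : Nat) (hj : j < keys.length) :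
    (pvOrder_B keys).getD keys[j] 0 = (j : Int) := by
  unfold pvOrder_B
  refine pv_fold_pairs_mem (PySem.List.enumerate keys) ?_ (j : Int) keys[j] ?_ _
  · rw [show (PySem.List.enumerate keys).map (·.2) = keys from PySem.List.map_snd_enumerate keys 0]
    exact hnd
  · have hlen : j < (PySem.List.enumerate keys).length := by
      rw [PySem.List.length_enumerate]; exact hj
    have := PySem.List.getElem_enumerate keys 0 j hlen
    have hmem : (PySem.List.enumerate keys)[j] ∈ PySem.List.enumerate keys := List.getElem_mem hlen
    rw [this] at hmem
    simpa using hmem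

-- ranks are monotone along the key list
theorem pv_keys_rank_pairwise (keys : List String) (hnd : keys.Nodup) :
    keys.Pairwise (fun a b => (pvOrder_B keys).getD a 0 ≤ (pvOrder_B keys).getD b 0) := by
  rw [List.pairwise_iff_getElem]
  intro i j hi hj hij
  rw [pv_order_getD keys hnd i hi, pv_order_getD keys hnd j hj]
  exact_mod_cast Nat.le_of_lt hij

-- ranks never decrease along the keyword-major match list
theorem pv_P_pairwise (rk : (Int × String × String) → Int) (R : String → Int)
    (f : (String × String) → List (Int × String × String))
    (hf : ∀ p, ∀ m ∈ f p, rk m = R p.1) :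
    ∀ its : List (String × String), its.Pairwise (fun p q => R p.1 ≤ R q.1) →
    (its.flatMap f).Pairwise (fun a b => rk a ≤ rk b) := by
  intro its
  induction its with
  | nil => intro _; exact List.Pairwise.nil
  | cons p its ih =>
    intro hpw
    rw [List.flatMap_cons, List.pairwise_append]
    refine ⟨?_, ih (List.pairwise_cons.1 hpw).2, ?_⟩
    · exact List.pairwise_of_forall_mem_list (fun a ha b hb => by
        rw [hf p a ha, hf p b hb])
    · intro a ha b hb
      obtain ⟨q, hq, hbq⟩ := List.mem_flatMap.1 hb
      rw [hf p a ha, hf q b hbq]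
      exact (List.pairwise_cons.1 hpw).1 q hq

-- B's sort by (index, rank) of the keyword-major match list is A's stable sort by index
theorem pv_sorted2_eq_sorted (key_words : List (String × String))
    (f : (String × String) → List (Int × String × String))
    (hf : ∀ p, ∀ m ∈ f p, m.2.1 = p.1) :
    PySem.List.sorted2 (((PySem.Dict.ofList key_words).items).flatMap f)
        (fun m => m.1) (fun m => (pvOrder_B (PySem.Dict.ofList key_words).keys).getD m.2.1 0) false
      = PySem.List.sorted (((PySem.Dict.ofList key_words).items).flatMap f) (fun x => x.1) := by
  set kwd := PySem.Dict.ofList key_words with hkwd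
  have hndk : kwd.keys.Nodup := PySem.Dict.nodup_keys_ofList key_words
  have hitems : kwd.items.Pairwise
      (fun p q => (pvOrder_B kwd.keys).getD p.1 0 ≤ (pvOrder_B kwd.keys).getD q.1 0) := by
    have := pv_keys_rank_pairwise kwd.keys hndk
    rw [show kwd.keys = kwd.items.map (·.1) from rfl, List.pairwise_map] at this
    exact this
  have hpw := pv_P_pairwise (fun m => (pvOrder_B kwd.keys).getD m.2.1 0)
    (fun k => (pvOrder_B kwd.keys).getD k 0) f
    (fun p m hm =>
      show (pvOrder_B kwd.keys).getD m.2.1 0 = (pvOrder_B kwd.keys).getD p.1 0 from by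
        rw [hf p m hm]) kwd.items hitems
  rw [pv_sorted2_eq_foldl, PySem.List.sorted_eq_foldl_insertBy]
  exact pv_foldl_insertBy_lex _ _ [] hpw (by intro y hy; simp at hy)

-- ===== VERDICT (by name: the statement is the Claim_ definition above) =====
theorem colorize_text_spec : Claim_equal_colorize_text := by
  intro text key_words _ hpre
  unfold Spec_colorize_text colorize_text colorize_text_alt
  show pvBuild_A text.toList (find_keywords_indices_A text.toList key_words)
    = pvBuild_B text.toList (PySem.List.sorted2
        ((PySem.Dict.ofList key_words).items.flatMap
          (fun p => ((pvHits_B text.toList (PySem.Dict.ofList key_words).keys).getD p.1 []).map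
            (fun i => (i, p.1, p.2))))
        (fun m => m.1) (fun m => (pvOrder_B (PySem.Dict.ofList key_words).keys).getD m.2.1 0) false)
  have hitems := pv_items_ne key_words hpre
  have hblocks : (PySem.Dict.ofList key_words).items.flatMap
      (fun p => ((pvHits_B text.toList (PySem.Dict.ofList key_words).keys).getD p.1 []).map
        (fun i => (i, p.1, p.2)))
      = (PySem.Dict.ofList key_words).items.flatMap (pvTrip text.toList) := by
    refine pv_flatMap_cong _ _ _ ?_
    intro p hp
    have hkw : p.1.toList ≠ [] := by
      intro hc
      exact hitems p hp (by rwa [← String.toList_eq_nil_iff])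
    rw [pv_hits_getD text.toList _ p.1 (PySem.Dict.mem_keys_of_mem_items _ hp) hkw,
        List.map_map]
    rfl
  rw [pv_matches_A text.toList key_words hpre, hblocks,
      pv_sorted2_eq_sorted key_words (pvTrip text.toList)
        (fun p m hm => by
          obtain ⟨j, _, rfl⟩ := List.mem_map.1 hm
          rfl),
      pvBuild_AB]
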